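-- pv_equiv track=rewrite | github.com/ankraft/aw-oneM2M-short-names | src/scriptAcop.py | toBitfield
-- ===== SOURCE A (Python) =====
-- operations = [
--     (32, 'DISCOVERY', 'i'),
--     (16, 'NOTIFY', 'n'),
--     ( 8, 'DELETE', 'd'),
--     ( 4, 'UPDATE', 'u'),
--     ( 2, 'RETRIEVE', 'r'),
--     ( 1, 'CREATE', 'c')
-- ]
--
-- def toBitfield(query):
-- 	r = []
-- 	for each in query.lower():
-- 		for op in operations:
-- 			if each == op[2]:
-- 				if op[0] not in r:
-- 					r.append(op[0])
-- 				break # break for if found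
-- 		else:
-- 			return -1 # return error if for did not exit
--
-- 	return sum(r)
-- ===== SOURCE B (Python) =====
-- operations = [
--     (32, 'DISCOVERY', 'i'),
--     (16, 'NOTIFY', 'n'),
--     ( 8, 'DELETE', 'd'),
--     ( 4, 'UPDATE', 'u'),
--     ( 2, 'RETRIEVE', 'r'),
--     ( 1, 'CREATE', 'c')
-- ]
--
-- def toBitfield(query):
--     # Two staged passes over the table instead of a per-character scan:
--     # validate once via a set-subset test, then sum the bits of the
--     # operations whose flag character occurs in the query.
--     q = query.lower()
--     if not set(q) <= {'i', 'n', 'd', 'u', 'r', 'c'}: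
--         return -1
--     return sum(bit for bit, _name, flag in operations if flag in q)
-- ===== Notes on version B (the rewrite author's own statement) =====
-- stated objective: simpler
-- what changed: B inverts the traversal axis: instead of A's per-character loop with an inner scan of the operations table and a unique-bit list summed at the end, B validates the whole query once with a set-subset test and then sums, over the six-entry operations table, the bits whose flag character occurs in the query (substring test).
import Mathlib
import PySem

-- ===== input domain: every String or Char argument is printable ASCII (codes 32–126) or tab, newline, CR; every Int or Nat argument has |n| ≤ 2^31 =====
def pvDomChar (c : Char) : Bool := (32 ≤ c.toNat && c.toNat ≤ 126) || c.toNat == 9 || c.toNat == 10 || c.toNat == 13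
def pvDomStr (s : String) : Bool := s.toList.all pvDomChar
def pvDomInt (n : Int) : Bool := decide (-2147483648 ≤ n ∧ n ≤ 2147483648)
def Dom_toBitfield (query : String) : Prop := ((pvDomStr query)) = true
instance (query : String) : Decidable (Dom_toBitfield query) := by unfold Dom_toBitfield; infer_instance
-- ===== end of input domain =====

-- B replaces A's per-character loop (inner table scan + unique-bit list summed at the end) by two
-- staged passes over the other axis: a set-subset validity test, then a sum over the operations
-- table of the bits whose flag character occurs in the query; same cost, simpler.

-- ===== PORT A =====
def pvOperations : List (Int × String × String) :=
  [(32, "DISCOVERY", "i"), (16, "NOTIFY", "n"), (8, "DELETE", "d"),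
   (4, "UPDATE", "u"), (2, "RETRIEVE", "r"), (1, "CREATE", "c")]

-- the inner 'for op in operations: … break / else: return -1' (none = the else-branch fires)
def pvInnerA (each : Char) : List (Int × String × String) → Option Int
  | [] => none
  | op :: rest => if String.ofList [each] = op.2.2 then some op.1 else pvInnerA each rest

def pvLoopA : List Char → List Int → Int
  | [], r => r.sum
  | each :: rest, r =>
    match pvInnerA each pvOperations with
    | none => -1
    | some v => pvLoopA rest (if v ∈ r then r else r ++ [v])

def toBitfield (query : String) : Int :=
  pvLoopA (PySem.Chars.lower query.toList) []

-- ===== PORT B =====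
def pvFlagSet : PySem.Set Char := PySem.Set.ofList ['i', 'n', 'd', 'u', 'r', 'c']

def toBitfield_alt (query : String) : Int :=
  let q := PySem.Chars.lower query.toList
  if PySem.Set.issubset (PySem.Set.ofList q) pvFlagSet = false then -1
  else ((pvOperations.filter (fun op => PySem.Chars.isIn op.2.2.toList q)).map (fun op => op.1)).sum

-- ===== PRECONDITION & SPEC =====
def Spec_toBitfield (query : String) (out : Int) : Prop := out = toBitfield_alt query
instance (query : String) (out : Int) : Decidable (Spec_toBitfield query out) := by unfold Spec_toBitfield; infer_instance

-- ===== CLAIM (what is proved, stated in full; the proofs are below) =====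
def Claim_equal_toBitfield : Prop := ∀ (query : String), Dom_toBitfield query → Spec_toBitfield query (toBitfield query)

-- ===== LEMMAS AND PROOFS =====

-- the table as (bit, flag char) pairs, for the proof only
def pvPairs : List (Int × Char) := [(32,'i'),(16,'n'),(8,'d'),(4,'u'),(2,'r'),(1,'c')]

-- bits of the flags occurring in cs whose bit is not yet in r
def pvG (cs : List Char) (r : List Int) : Int :=
  (pvPairs.map (fun p => if p.2 ∈ cs ∧ p.1 ∉ r then p.1 else 0)).sum

lemma pvStrCharEq (c d : Char) : (String.ofList [c] = String.ofList [d]) ↔ c = d := by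
  rw [← String.toList_inj]; simp

lemma pvInfixSingleton {α : Type} (a : α) (l : List α) : [a] <:+: l ↔ a ∈ l := by
  constructor
  · intro h; exact h.subset (List.mem_singleton_self a)
  · intro h
    obtain ⟨s, t, rfl⟩ := List.append_of_mem h
    exact ⟨s, t, by simp⟩

lemma pvValid_iff (c : Char) :
    pvInnerA c pvOperations ≠ none ↔ c ∈ ['i','n','d','u','r','c'] := by
  have ki := pvStrCharEq c 'i'
  have kn := pvStrCharEq c 'n'
  have kd := pvStrCharEq c 'd'
  have ku := pvStrCharEq c 'u'
  have kr := pvStrCharEq c 'r'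
  have kc := pvStrCharEq c 'c'
  simp only [pvInnerA, pvOperations, ki, kn, kd, ku, kr, kc]
  split_ifs <;> simp_all


lemma pvLookup_pairs (c : Char) (v : Int) (hA : pvInnerA c pvOperations = some v) :
    (v, c) ∈ pvPairs := by
  have ki := pvStrCharEq c 'i'
  have kn := pvStrCharEq c 'n'
  have kd := pvStrCharEq c 'd'
  have ku := pvStrCharEq c 'u'
  have kr := pvStrCharEq c 'r'
  have kc := pvStrCharEq c 'c'
  simp only [pvInnerA, pvOperations, ki, kn, kd, ku, kr, kc] at hA
  split_ifs at hA <;> simp_all [pvPairs]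

lemma pvG_step (c : Char) (v : Int) (rest : List Char) (r : List Int)
    (hcv : (v, c) ∈ pvPairs) :
    (if v ∈ r then r else r ++ [v]).sum + pvG rest (if v ∈ r then r else r ++ [v]) =
      r.sum + pvG (c :: rest) r := by
  simp only [pvPairs, List.mem_cons, Prod.mk.injEq,
    List.not_mem_nil, or_false] at hcv
  rcases hcv with ⟨rfl,rfl⟩|⟨rfl,rfl⟩|⟨rfl,rfl⟩|⟨rfl,rfl⟩|⟨rfl,rfl⟩|⟨rfl,rfl⟩ <;>
    split_ifs with hm <;>
      (simp [hm, pvG, pvPairs, List.mem_append, List.mem_cons]; try ring)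

lemma pvLoopA_eq (cs : List Char) : ∀ r : List Int,
    pvLoopA cs r =
      if ∀ c ∈ cs, pvInnerA c pvOperations ≠ none then r.sum + pvG cs r else -1 := by
  induction cs with
  | nil => intro r; simp [pvLoopA, pvG, pvPairs]
  | cons c rest ih =>
    intro r
    cases hA : pvInnerA c pvOperations with
    | none =>
      have hno : ¬ ∀ c' ∈ c :: rest, pvInnerA c' pvOperations ≠ none := by
        intro h; exact h c List.mem_cons_self hA
      rw [if_neg hno]
      simp [pvLoopA, hA]
    | some v =>
      have hstep : pvLoopA (c :: rest) r = pvLoopA rest (if v ∈ r then r else r ++ [v]) := by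
        simp [pvLoopA, hA]
      have hvalid : pvInnerA c pvOperations ≠ none := by simp [hA]
      rw [hstep, ih]
      simp only [List.forall_mem_cons]
      by_cases hall : ∀ c' ∈ rest, pvInnerA c' pvOperations ≠ none
      · rw [if_pos hall, if_pos (show (pvInnerA c pvOperations ≠ none) ∧
          (∀ c' ∈ rest, pvInnerA c' pvOperations ≠ none) from ⟨hvalid, hall⟩)]
        exact pvG_step c v rest r (pvLookup_pairs c v hA)
      · rw [if_neg hall, if_neg (by intro h; exact hall h.2)]

lemma pvIsIn_singleton (a : Char) (l : List Char) :
    PySem.Chars.isIn [a] l = decide (a ∈ l) := by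
  cases hb : PySem.Chars.isIn [a] l
  · have h := (PySem.Chars.isIn_eq_false_iff _ _).mp hb
    rw [pvInfixSingleton] at h
    simp [h]
  · have h := (PySem.Chars.isIn_iff_infix _ _).mp hb
    rw [pvInfixSingleton] at h
    simp [h]

lemma pvSumFilter {α : Type} (p : α → Bool) (f : α → Int) (x : α) (xs : List α) :
    ((List.filter p (x :: xs)).map f).sum =
      (if p x then f x else 0) + ((xs.filter p).map f).sum := by
  by_cases h : p x <;> simp [h]

-- ===== VERDICT (by name: the statement is the Claim_ definition above) =====
theorem toBitfield_spec : Claim_equal_toBitfield := by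
  intro query _
  unfold Spec_toBitfield toBitfield toBitfield_alt
  rw [pvLoopA_eq]
  by_cases hall : ∀ c ∈ PySem.Chars.lower query.toList, pvInnerA c pvOperations ≠ none
  · have hsub : PySem.Set.issubset (PySem.Set.ofList (PySem.Chars.lower query.toList)) pvFlagSet = true := by
      rw [PySem.Set.issubset_iff]
      intro x hx
      have hxcs : x ∈ PySem.Chars.lower query.toList := by simpa using hx
      have hm := (pvValid_iff x).mp (hall x hxcs)
      simpa [pvFlagSet] using hm
    rw [if_pos hall, if_neg (by simp [hsub])]
    simp [pvSumFilter, pvG, pvPairs, pvOperations, pvIsIn_singleton]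
  · have hsub : PySem.Set.issubset (PySem.Set.ofList (PySem.Chars.lower query.toList)) pvFlagSet = false := by
      rw [Bool.eq_false_iff]
      intro hs
      push Not at hall
      obtain ⟨x, hx, hbad⟩ := hall
      have hxm := (PySem.Set.issubset_iff _ _).mp hs x (by simpa using hx)
      have hxf : x ∈ ['i','n','d','u','r','c'] := by simpa [pvFlagSet] using hxm
      exact absurd hbad (by simp [(pvValid_iff x).mpr hxf])
    rw [if_neg hall, if_pos (by simp [hsub])]
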